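-- pv_equiv track=rewrite | github.com/DylanTech2025/AdventOfCode | 2025/src/day9.py | genGrid
-- ===== SOURCE A (Python) =====
-- def getGridDimensions(points):
--     maxX,maxY = 0, 0
--     for x,y in points:
--         if x > maxX:
--             maxX = x
--         if y > maxY:
--             maxY = y
--     return maxX+1, maxY+1
--
-- def genGrid(points):
--     maxX,maxY = getGridDimensions(points)
--
--     grid = []
--     for row in range(maxY,-1,-1):
--         line = []
--         for col in range(maxX+1):
--             line.append( '0' if (col, row) in points else '.')
--         grid.append(line)
--     grid.append([str(i) for i in range(maxX+1)])
--     return grid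
-- ===== SOURCE B (Python) =====
-- def genGrid(points):
--     maxX = maxY = 0
--     for x, y in points:
--         if x > maxX:
--             maxX = x
--         if y > maxY:
--             maxY = y
--     maxX += 1
--     maxY += 1
--     grid = [['.'] * (maxX + 1) for _ in range(maxY + 1)]
--     for x, y in points:
--         if x >= 0 and y >= 0:
--             grid[maxY - y][x] = '0'
--     grid.append([str(i) for i in range(maxX + 1)])
--     return grid
-- ===== Notes on version B (the rewrite author's own statement) =====
-- stated objective: faster
-- what changed: Replaces the gather (membership test of every grid cell against the points list) by a scatter: pre-fill the whole grid with '.' and write '0' once per point at its cell, guarded for non-negative coordinates.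
import Mathlib
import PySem

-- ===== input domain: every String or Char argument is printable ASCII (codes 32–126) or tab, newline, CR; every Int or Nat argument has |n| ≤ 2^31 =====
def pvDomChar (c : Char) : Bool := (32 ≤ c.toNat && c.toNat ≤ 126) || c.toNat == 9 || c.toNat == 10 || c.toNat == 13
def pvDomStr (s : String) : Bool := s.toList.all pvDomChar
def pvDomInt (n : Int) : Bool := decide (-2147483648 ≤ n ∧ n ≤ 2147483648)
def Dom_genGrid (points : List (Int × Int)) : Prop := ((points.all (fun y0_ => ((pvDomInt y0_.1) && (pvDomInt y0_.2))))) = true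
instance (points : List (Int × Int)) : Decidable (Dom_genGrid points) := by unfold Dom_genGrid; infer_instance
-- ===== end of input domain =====

-- B replaces A's per-cell membership test (gather) by one write per point into a pre-filled grid (scatter); objective: faster.

-- ===== PORT A =====
-- helper getGridDimensions, transliterated
def getGridDimensionsA (points : List (Int × Int)) : Int × Int :=
  let m := points.foldl (fun (m : Int × Int) q =>
    let m1 := if q.1 > m.1 then (q.1, m.2) else m
    if q.2 > m1.2 then (m1.1, q.2) else m1) (0, 0)
  (m.1 + 1, m.2 + 1)

def genGrid (points : List (Int × Int)) : List (List String) :=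
  let d := getGridDimensionsA points
  let maxX := d.1
  let maxY := d.2
  let grid := (PySem.List.pyRange maxY (-1) (-1)).foldl (fun grid row =>
    let line := (PySem.List.pyRange 0 (maxX + 1) 1).foldl (fun line col =>
      line ++ [if points.contains (col, row) then "0" else "."]) []
    grid ++ [line]) []
  grid ++ [(PySem.List.pyRange 0 (maxX + 1) 1).map PySem.Int.toStr]

-- ===== PORT B =====
def genGrid_alt (points : List (Int × Int)) : List (List String) :=
  -- the max-tracking loop, transliterated from Source B
  let m := points.foldl (fun (m : Int × Int) q =>
    let m1 := if q.1 > m.1 then (q.1, m.2) else m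
    if q.2 > m1.2 then (m1.1, q.2) else m1) (0, 0)
  let maxX := m.1 + 1
  let maxY := m.2 + 1
  let grid0 := List.replicate (maxY + 1).toNat (List.replicate (maxX + 1).toNat ".")
  -- scatter: grid[maxY - y][x] = '0' for each in-range point (indices are nonneg here, so .toNat is exact)
  let grid := points.foldl (fun g q =>
    if 0 ≤ q.1 ∧ 0 ≤ q.2 then
      g.modify (maxY - q.2).toNat (fun row => row.set q.1.toNat "0")
    else g) grid0
  grid ++ [(PySem.List.pyRange 0 (maxX + 1) 1).map PySem.Int.toStr]

-- ===== PRECONDITION & SPEC =====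
def Spec_genGrid (points : List (Int × Int)) (out : List (List String)) : Prop := out = genGrid_alt points
instance (points : List (Int × Int)) (out : List (List String)) : Decidable (Spec_genGrid points out) := by unfold Spec_genGrid; infer_instance

-- ===== CLAIM (what is proved, stated in full; the proofs are below) =====
def Claim_equal_genGrid : Prop := ∀ (points : List (Int × Int)), Dom_genGrid points → Spec_genGrid points (genGrid points)

-- ===== LEMMAS AND PROOFS =====

-- the shared max-tracking fold step
def pvStep (m q : Int × Int) : Int × Int :=
  let m1 := if q.1 > m.1 then (q.1, m.2) else m
  if q.2 > m1.2 then (m1.1, q.2) else m1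

theorem pvStep_eq (m q : Int × Int) : pvStep m q = (max m.1 q.1, max m.2 q.2) := by
  rcases m with ⟨a, b⟩; rcases q with ⟨c, d⟩
  simp only [pvStep]
  split_ifs <;> simp_all [Prod.ext_iff] <;> omega

theorem pvFold_mono (l : List (Int × Int)) (i : Int × Int) :
    i.1 ≤ (l.foldl pvStep i).1 ∧ i.2 ≤ (l.foldl pvStep i).2 := by
  induction l generalizing i with
  | nil => exact ⟨le_refl _, le_refl _⟩
  | cons q t ih =>
    rw [List.foldl_cons, pvStep_eq]
    have h := ih (max i.1 q.1, max i.2 q.2)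
    exact ⟨le_trans (le_max_left _ _) h.1, le_trans (le_max_left _ _) h.2⟩

theorem pvFold_bound (l : List (Int × Int)) (i : Int × Int) :
    ∀ q ∈ l, q.1 ≤ (l.foldl pvStep i).1 ∧ q.2 ≤ (l.foldl pvStep i).2 := by
  induction l generalizing i with
  | nil => intro q h; cases h
  | cons p t ih =>
    intro q hq
    rw [List.foldl_cons, pvStep_eq]
    rcases List.mem_cons.mp hq with h | h
    · subst h
      have h := pvFold_mono t (max i.1 q.1, max i.2 q.2)
      exact ⟨le_trans (le_max_right _ _) h.1, le_trans (le_max_right _ _) h.2⟩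
    · exact ih (max i.1 p.1, max i.2 p.2) q h

-- generic: foldl appending singletons is map
theorem pvFoldl_append_map {α β : Type} (l : List α) (f : α → β) (init : List β) :
    l.foldl (fun acc x => acc ++ [f x]) init = init ++ l.map f := by
  induction l generalizing init with
  | nil => simp
  | cons a t ih => simp [ih]

-- set on a map-over-range row
theorem pvSet_map_range {β : Type} (h : Nat → β) (C j : Nat) (v : β) :
    ((List.range C).map h).set j v = (List.range C).map (fun j' => if j' = j then v else h j') := by
  apply List.ext_getElem
  · simp
  · intro n h1 h2
    simp at h1
    simp [List.getElem_set, List.getElem_range, eq_comm]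

-- modify on a map-over-range grid
theorem pvModify_map_range {β : Type} (f : Nat → β) (R i : Nat) (g : β → β) :
    ((List.range R).map f).modify i g = (List.range R).map (fun i' => if i' = i then g (f i') else f i') := by
  apply List.ext_getElem
  · simp
  · intro n h1 h2
    simp at h1
    simp [List.getElem_modify, List.getElem_range, eq_comm]

-- the scatter fold over a predicate-generated grid
theorem pvScatter (mY : Int) (R C : Nat) (l : List (Int × Int))
    (hb : ∀ q ∈ l, (0 ≤ q.1 → q.1.toNat < C) ∧ (0 ≤ q.2 → (mY - q.2).toNat < R))
    (P : Nat → Nat → Bool) :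
    l.foldl (fun g q =>
        if 0 ≤ q.1 ∧ 0 ≤ q.2 then
          g.modify (mY - q.2).toNat (fun row => row.set q.1.toNat "0")
        else g)
      ((List.range R).map (fun i => (List.range C).map (fun j => if P i j then "0" else ".")))
    = (List.range R).map (fun i => (List.range C).map (fun j =>
        if (P i j || l.any (fun q => decide (0 ≤ q.1) && decide (0 ≤ q.2)
              && decide ((mY - q.2).toNat = i) && decide (q.1.toNat = j))) then "0" else ".")) := by
  induction l generalizing P with
  | nil => simp
  | cons q t ih =>
    have hbt : ∀ p ∈ t, (0 ≤ p.1 → p.1.toNat < C) ∧ (0 ≤ p.2 → (mY - p.2).toNat < R) :=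
      fun p hp => hb p (List.mem_cons_of_mem _ hp)
    rw [List.foldl_cons]
    by_cases hg : 0 ≤ q.1 ∧ 0 ≤ q.2
    · rw [if_pos hg, pvModify_map_range]
      have hstep : ((List.range R).map (fun i' =>
            if i' = (mY - q.2).toNat then
              ((List.range C).map (fun j => if P i' j then "0" else ".")).set q.1.toNat "0"
            else (List.range C).map (fun j => if P i' j then "0" else ".")))
          = (List.range R).map (fun i => (List.range C).map (fun j =>
              if (P i j || (decide (0 ≤ q.1) && decide (0 ≤ q.2)
                  && decide ((mY - q.2).toNat = i) && decide (q.1.toNat = j))) then "0" else ".")) := by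
        apply List.map_congr_left
        intro i hi
        by_cases hieq : i = (mY - q.2).toNat
        · rw [if_pos hieq, pvSet_map_range]
          apply List.map_congr_left
          intro j hj
          by_cases hjq : j = q.1.toNat
          · simp [hjq, hieq, hg.1, hg.2]
          · have : ¬ (q.1.toNat = j) := fun h => hjq h.symm
            simp [hjq, this]
        · rw [if_neg hieq]
          apply List.map_congr_left
          intro j hj
          have : ¬ ((mY - q.2).toNat = i) := fun h => hieq h.symm
          simp [this]
      rw [hstep, ih hbt]
      apply List.map_congr_left
      intro i hi
      apply List.map_congr_left
      intro j hj
      congr 1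
      simp [Bool.or_assoc]
    · rw [if_neg hg, ih hbt]
      apply List.map_congr_left
      intro i hi
      apply List.map_congr_left
      intro j hj
      congr 1
      rcases Decidable.not_and_iff_or_not.mp hg with h | h <;>
        simp [List.any_cons, h]

-- ===== VERDICT (by name: the statement is the Claim_ definition above) =====
theorem genGrid_spec : Claim_equal_genGrid := by
  intro points _
  unfold Spec_genGrid genGrid genGrid_alt getGridDimensionsA
  have hstep : (fun (m : Int × Int) (q : Int × Int) =>
      let m1 := if q.1 > m.1 then (q.1, m.2) else m
      if q.2 > m1.2 then (m1.1, q.2) else m1) = pvStep := rfl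
  rw [hstep]
  set F := points.foldl pvStep (0, 0) with hF
  have hm0 := pvFold_mono points (0, 0)
  have hbq := pvFold_bound points (0, 0)
  rw [← hF] at hm0 hbq
  simp only at hm0
  dsimp only
  rw [PySem.List.pyRange_neg_one, PySem.List.pyRange_one]
  simp only [pvFoldl_append_map, List.map_map, List.nil_append, sub_neg_eq_add, sub_zero, zero_add]
  have hb : ∀ q ∈ points, (0 ≤ q.1 → q.1.toNat < (F.1 + 1 + 1).toNat) ∧
      (0 ≤ q.2 → (F.2 + 1 - q.2).toNat < (F.2 + 1 + 1).toNat) := by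
    intro q hq
    have h := hbq q hq
    omega
  have hg0 : List.replicate (F.2 + 1 + 1).toNat (List.replicate (F.1 + 1 + 1).toNat ".")
      = (List.range ((F.2 + 1 + 1).toNat)).map
          (fun i => (List.range ((F.1 + 1 + 1).toNat)).map (fun j => if (false : Bool) then "0" else ".")) := by
    simp
  rw [hg0, pvScatter (F.2 + 1) ((F.2 + 1 + 1).toNat) ((F.1 + 1 + 1).toNat) points hb (fun _ _ => false)]
  congr 1
  apply List.map_congr_left
  intro i hi
  rw [List.mem_range] at hi
  simp only [Function.comp_apply]
  apply List.map_congr_left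
  intro j hj
  rw [List.mem_range] at hj
  simp only [Function.comp_apply, Bool.false_or]
  have hcond : points.contains ((j : Int), F.2 + 1 - (i : Int))
      = points.any (fun q => decide (0 ≤ q.1) && decide (0 ≤ q.2)
          && decide ((F.2 + 1 - q.2).toNat = i) && decide (q.1.toNat = j)) := by
    rw [Bool.eq_iff_iff]
    simp only [List.contains_iff_mem, List.any_eq_true, Bool.and_eq_true, decide_eq_true_eq]
    constructor
    · intro hmem
      refine ⟨_, hmem, ⟨⟨by omega, by omega⟩, by omega⟩, by omega⟩
    · rintro ⟨⟨q1, q2⟩, hmem, ⟨⟨h1, h2⟩, h3⟩, h4⟩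
      have hbnd := hbq _ hmem
      simp only at hbnd h1 h2 h3 h4
      have e1 : q1 = (j : Int) := by omega
      have e2 : q2 = F.2 + 1 - (i : Int) := by omega
      rw [e1, e2] at hmem
      exact hmem
  rw [hcond]
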